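-- pv_equiv track=rewrite | github.com/ppaallookkaa/topic_updater | topic_update.py | find_fit_combos
-- ===== SOURCE A (Python) =====
-- def find_fit_combos(
--     segments: list,
--     new_quote: str,
--     topiclen: int,
--     max_combos: int = 6,
-- ) -> list:
--     """
--     Find combinations of (replace_idx, remove_idxs) where replacing the
--     segment at replace_idx with new_quote and dropping segments at remove_idxs
--     produces a topic that fits within topiclen bytes.
--
--     For each replacement target, the minimum additional removals are found
--     greedily (longest segments removed first). Returns up to max_combos results
--     sorted by fewest removals then by replace_idx.
--     """
--     results = []
--     n = len(segments)
--
--     for replace_idx in range(n):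
--         working = [new_quote if i == replace_idx else seg for i, seg in enumerate(segments)]
--         topic = ' | '.join(working)
--         if len(topic.encode('utf-8')) <= topiclen:
--             results.append((replace_idx, ()))
--             continue
--
--         # Greedily remove longest other segments until it fits
--         other_idxs = sorted(
--             (i for i in range(n) if i != replace_idx),
--             key=lambda i: len(segments[i].encode('utf-8')),
--             reverse=True,
--         )
--         remove_idxs: list = []
--         for idx in other_idxs:
--             remove_idxs.append(idx)
--             remaining = [seg for i, seg in enumerate(working) if i not in remove_idxs]
--             if len(' | '.join(remaining).encode('utf-8')) <= topiclen:
--                 results.append((replace_idx, tuple(sorted(remove_idxs))))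
--                 break
--
--     results.sort(key=lambda x: (len(x[1]), x[0]))
--     return results[:max_combos]
-- ===== SOURCE B (Python) =====
-- def find_fit_combos(
--     segments: list,
--     new_quote: str,
--     topiclen: int,
--     max_combos: int = 6,
-- ) -> list:
--     # Different algorithm: instead of greedily removing segments one at a time
--     # and re-joining/re-encoding the candidate topic after each removal, compute
--     # per-segment byte lengths once, build a prefix-sum array of bytes saved by
--     # dropping the k longest other segments, and BINARY-SEARCH the least k that
--     # fits (the saved amount is monotone in k), then slice out those k indices.
--     n = len(segments)
--     lens = [len(s.encode('utf-8')) for s in segments]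
--     qlen = len(new_quote.encode('utf-8'))
--     base = sum(lens) + 3 * (n - 1) + qlen
--     results = []
--     for r in range(n):
--         total = base - lens[r]
--         if total <= topiclen:
--             results.append((r, ()))
--             continue
--         others = sorted((i for i in range(n) if i != r),
--                         key=lambda i: lens[i], reverse=True)
--         # prefix[k] = bytes saved by dropping the k longest other segments
--         prefix = [0]
--         for i in others:
--             prefix.append(prefix[-1] + (lens[i] + 3))
--         if total - prefix[n - 1] > topiclen:
--             continue  # even removing every other segment cannot fit
--         lo, hi = 1, n - 1
--         while lo < hi:
--             mid = (lo + hi) // 2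
--             if total - prefix[mid] <= topiclen:
--                 hi = mid
--             else:
--                 lo = mid + 1
--         results.append((r, tuple(sorted(others[:lo]))))
--     results.sort(key=lambda x: (len(x[1]), x[0]))
--     return results[:max_combos]
-- ===== Notes on version B (the rewrite author's own statement) =====
-- stated objective: faster
-- what changed: B replaces A's greedy remove-one-rebuild-rejoin-reencode loop by a closed-form byte count (precomputed segment lengths, join length = sum + 3 per separator), a prefix-sum array of bytes saved by dropping the k longest other segments, and a binary search for the least fitting k, whose first k indices are then sliced out.
import Mathlib
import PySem

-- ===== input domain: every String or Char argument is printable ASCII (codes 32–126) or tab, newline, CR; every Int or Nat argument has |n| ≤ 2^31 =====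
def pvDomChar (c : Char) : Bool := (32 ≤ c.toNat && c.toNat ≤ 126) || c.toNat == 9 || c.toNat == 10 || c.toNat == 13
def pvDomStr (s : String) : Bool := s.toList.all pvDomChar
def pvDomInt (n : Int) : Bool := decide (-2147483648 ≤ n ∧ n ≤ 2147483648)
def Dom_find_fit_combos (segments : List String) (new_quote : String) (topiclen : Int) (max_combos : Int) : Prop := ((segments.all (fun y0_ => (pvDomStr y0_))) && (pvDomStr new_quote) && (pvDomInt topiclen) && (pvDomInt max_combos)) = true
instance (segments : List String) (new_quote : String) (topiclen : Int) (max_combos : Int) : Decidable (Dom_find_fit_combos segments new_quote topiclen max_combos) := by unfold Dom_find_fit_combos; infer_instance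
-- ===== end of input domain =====

-- B replaces A's greedy remove-and-rejoin loop by precomputed byte lengths, a prefix-sum
-- array of bytes saved per removal count, and a binary search for the least fitting count;
-- objective: faster (asymptotic).


-- ===== PORT A =====

-- len(c.encode('utf-8')) for one code point (exact: Lean Char excludes surrogates)
def pvCharBytes (c : Char) : Int :=
  if c.toNat < 128 then 1 else if c.toNat < 2048 then 2 else if c.toNat < 65536 then 3 else 4

-- len(s.encode('utf-8')) (exact on all Lean strings)
def pvUtf8Len (s : String) : Int := (s.toList.map pvCharBytes).sum

-- A's inner 'for idx in other_idxs: … break' loop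
def pvGreedyA (topiclen : Int) (working : List String) (os : List Int) (acc : List Int) :
    Option (List Int) :=
  match os with
  | [] => none
  | i :: rest =>
    let acc' := acc ++ [i]
    let remaining :=
      ((PySem.List.enumerate working 0).filter (fun p => !(acc'.contains p.1))).map (·.2)
    if pvUtf8Len (PySem.Str.join " | " remaining) ≤ topiclen then
      some (PySem.List.sorted acc' (fun x => x) false)
    else pvGreedyA topiclen working rest acc'

def find_fit_combos (segments : List String) (new_quote : String) (topiclen : Int) (max_combos : Int) : List (Int × List Int) :=
  let n : Int := PySem.List.len segments
  let results := (PySem.List.pyRange 0 n 1).foldl (fun res r =>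
    let working := (PySem.List.enumerate segments 0).map (fun p => if p.1 == r then new_quote else p.2)
    let topic := PySem.Str.join " | " working
    if pvUtf8Len topic ≤ topiclen then res ++ [(r, ([] : List Int))]
    else
      let other_idxs := PySem.List.sorted ((PySem.List.pyRange 0 n 1).filter (fun i => !(i == r)))
        (fun i => pvUtf8Len (PySem.List.pyGetD segments i "")) true
      match pvGreedyA topiclen working other_idxs [] with
      | some rs => res ++ [(r, rs)]
      | none => res) ([] : List (Int × List Int))
  PySem.List.slice (PySem.List.sorted2 results (fun x => (x.2.length : Int)) (fun x => x.1) false)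
    none (some max_combos)

-- ===== PORT B =====

-- B's 'while lo < hi' binary search for the least removal count that fits
def pvBSearch (topiclen total : Int) (pfx : List Int) (lo hi : Int) : Int :=
  if h : lo < hi then
    let mid := PySem.Int.floordiv (lo + hi) 2
    if total - PySem.List.pyGetD pfx mid 0 ≤ topiclen then
      pvBSearch topiclen total pfx lo mid
    else
      pvBSearch topiclen total pfx (mid + 1) hi
  else lo
termination_by (hi - lo).toNat
decreasing_by
  · have h1 : PySem.Int.floordiv (lo + hi) 2 < hi := by
      rw [PySem.Int.floordiv_eq_ediv_of_pos (by omega)]; omega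
    have h2 : lo ≤ PySem.Int.floordiv (lo + hi) 2 := by
      rw [PySem.Int.floordiv_eq_ediv_of_pos (by omega)]; omega
    omega
  · have h2 : lo ≤ PySem.Int.floordiv (lo + hi) 2 := by
      rw [PySem.Int.floordiv_eq_ediv_of_pos (by omega)]; omega
    omega

def find_fit_combos_alt (segments : List String) (new_quote : String) (topiclen : Int) (max_combos : Int) : List (Int × List Int) :=
  let n : Int := PySem.List.len segments
  let lens := segments.map pvUtf8Len
  let qlen := pvUtf8Len new_quote
  let base := lens.sum + 3 * (n - 1) + qlen
  let results := (PySem.List.pyRange 0 n 1).foldl (fun res r =>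
    if base - PySem.List.pyGetD lens r 0 ≤ topiclen then res ++ [(r, ([] : List Int))]
    else
      let others := PySem.List.sorted ((PySem.List.pyRange 0 n 1).filter (fun i => !(i == r)))
        (fun i => PySem.List.pyGetD lens i 0) true
      let pfx := others.foldl
        (fun p i => p ++ [PySem.List.pyGetD p (-1) 0 + (PySem.List.pyGetD lens i 0 + 3)]) [(0 : Int)]
      if topiclen < base - PySem.List.pyGetD lens r 0 - PySem.List.pyGetD pfx (n - 1) 0 then res
      else
        res ++ [(r, PySem.List.sorted
          (PySem.List.slice others none
            (some (pvBSearch topiclen (base - PySem.List.pyGetD lens r 0) pfx 1 (n - 1))))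
          (fun x => x) false)]) ([] : List (Int × List Int))
  PySem.List.slice (PySem.List.sorted2 results (fun x => (x.2.length : Int)) (fun x => x.1) false)
    none (some max_combos)

-- ===== PRECONDITION & SPEC =====
def Spec_find_fit_combos (segments : List String) (new_quote : String) (topiclen : Int) (max_combos : Int) (out : List (Int × List Int)) : Prop := out = find_fit_combos_alt segments new_quote topiclen max_combos
instance (segments : List String) (new_quote : String) (topiclen : Int) (max_combos : Int) (out : List (Int × List Int)) : Decidable (Spec_find_fit_combos segments new_quote topiclen max_combos out) := by unfold Spec_find_fit_combos; infer_instance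

-- ===== CLAIM (what is proved, stated in full; the proofs are below) =====
def Claim_equal_find_fit_combos : Prop := ∀ (segments : List String) (new_quote : String) (topiclen : Int) (max_combos : Int), Dom_find_fit_combos segments new_quote topiclen max_combos → Spec_find_fit_combos segments new_quote topiclen max_combos (find_fit_combos segments new_quote topiclen max_combos)

-- ===== LEMMAS AND PROOFS =====

-- arithmetic mirror of A's greedy loop (proof-only intermediate)
def pvGreedyArith (topiclen : Int) (lens : List Int) (os : List Int) (total : Int) (acc : List Int) :
    Option (List Int) :=
  match os with
  | [] => none
  | i :: rest =>
    let total' := total - (PySem.List.pyGetD lens i 0 + 3)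
    let acc' := acc ++ [i]
    if total' ≤ topiclen then some (PySem.List.sorted acc' (fun x => x) false)
    else pvGreedyArith topiclen lens rest total' acc'

-- position (1-based) of the first prefix of the cost list whose removal makes the topic fit
def pvFirstFit (topiclen : Int) : List Int → Int → Option Int
  | [], _ => none
  | c :: cs, total =>
    if total - c ≤ topiclen then some 1 else (pvFirstFit topiclen cs (total - c)).map (· + 1)

def pvCosts (lens os : List Int) : List Int := os.map (fun i => PySem.List.pyGetD lens i 0 + 3)

def pvScan (t : Int) : List Int → List Int
  | [] => []
  | c :: cs => (t + c) :: pvScan (t + c) cs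

-- the 'remaining' list A rebuilds each step
def pvRem (working : List String) (acc : List Int) : List String :=
  ((PySem.List.enumerate working 0).filter (fun p => !(acc.contains p.1))).map (·.2)

def pvCLen (cs : List Char) : Int := (cs.map pvCharBytes).sum

theorem pvUtf8Len_eq (s : String) : pvUtf8Len s = pvCLen s.toList := rfl

theorem pvCLen_append (a b : List Char) : pvCLen (a ++ b) = pvCLen a + pvCLen b := by simp [pvCLen]

-- length of ' | '.join(xs): sum of lengths plus 3 per separator
theorem pv_join_len (xs : List String) (hne : xs ≠ []) :
    pvUtf8Len (PySem.Str.join " | " xs) =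
      (xs.map pvUtf8Len).sum + 3 * ((xs.length : Int) - 1) := by
  induction xs with
  | nil => exact absurd rfl hne
  | cons a t ih =>
    cases t with
    | nil =>
      simp [pvUtf8Len_eq, PySem.Str.toList_join, PySem.Chars.join_singleton]
    | cons b t2 =>
      have h2 : (b :: t2 : List String) ≠ [] := by simp
      have := ih h2
      rw [pvUtf8Len_eq, PySem.Str.toList_join] at this ⊢
      simp only [List.map_cons, PySem.Chars.join_cons_cons, pvCLen_append]
      rw [show (b.toList :: List.map String.toList t2) = List.map String.toList (b :: t2) from rfl,
        this]
      have hsep : pvCLen (" | ".toList) = 3 := by decide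
      rw [hsep]
      simp [List.length_cons, pvUtf8Len_eq]
      ring

-- indices past r never match: the enumerate-map is the identity
theorem pv_sum_working_none (nq : String) (xs : List String) (s r : Int) (h : r < s) :
    ((PySem.List.enumerate xs s).map (fun p => if p.1 == r then nq else p.2)) = xs := by
  induction xs generalizing s with
  | nil => simp [PySem.List.enumerate]
  | cons a t ih =>
    rw [PySem.List.enumerate_cons]
    simp only [List.map_cons]
    rw [if_neg (by simp; omega), ih (s+1) (by omega)]

-- total byte length of A's 'working' list
theorem pv_sum_working (nq : String) (xs : List String) (s r : Int)
    (h1 : s ≤ r) (h2 : r < s + xs.length) :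
    (((PySem.List.enumerate xs s).map (fun p => if p.1 == r then nq else p.2)).map pvUtf8Len).sum
      = (xs.map pvUtf8Len).sum - pvUtf8Len (PySem.List.pyGetD xs (r - s) "") + pvUtf8Len nq := by
  induction xs generalizing s with
  | nil => simp at h2; omega
  | cons a t ih =>
    rw [PySem.List.enumerate_cons]
    simp only [List.map_cons, List.sum_cons]
    by_cases hrs : r = s
    · subst hrs
      rw [pv_sum_working_none nq t (r+1) r (by omega)]
      simp [PySem.List.pyGetD_zero_cons]
      ring
    · have hlen : r < (s+1) + (t.length : Int) := by push_cast [List.length_cons] at h2; omega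
      rw [if_neg (by simp; omega), ih (s+1) (by omega) hlen]
      have hget : PySem.List.pyGetD (a :: t) (r - s) "" = PySem.List.pyGetD t (r - (s+1)) "" := by
        rw [PySem.List.pyGetD_eq_getElem (a :: t) "" (by omega)
              (by push_cast [List.length_cons]; omega),
            PySem.List.pyGetD_eq_getElem t "" (by omega) (by omega)]
        have hk : (r - s).toNat = (r - (s+1)).toNat + 1 := by omega
        simp only [hk, List.getElem_cons_succ]
      rw [hget]
      ring

-- stable sort only looks at key values of members
theorem pv_insertBy_congr {α : Type} (b1 b2 : α → α → Bool) (x : α) (ys : List α)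
    (h : ∀ y ∈ ys, b1 x y = b2 x y) :
    PySem.List.insertBy b1 x ys = PySem.List.insertBy b2 x ys := by
  induction ys with
  | nil => rfl
  | cons y t ih =>
    simp only [PySem.List.insertBy]
    rw [h y (List.mem_cons_self)]
    by_cases hb : b2 x y = true
    · simp [hb]
    · simp only [hb]
      rw [ih (fun z hz => h z (List.mem_cons_of_mem _ hz))]

theorem pv_foldl_insertBy_congr {α : Type} (b1 b2 : α → α → Bool) (S : List α)
    (hS : ∀ x ∈ S, ∀ y ∈ S, b1 x y = b2 x y) :
    ∀ (xs acc : List α), (∀ x ∈ xs, x ∈ S) → (∀ x ∈ acc, x ∈ S) →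
    xs.foldl (fun acc x => PySem.List.insertBy b1 x acc) acc
      = xs.foldl (fun acc x => PySem.List.insertBy b2 x acc) acc := by
  intro xs
  induction xs with
  | nil => intro acc _ _; rfl
  | cons x t ih =>
    intro acc hxs hacc
    simp only [List.foldl_cons]
    have hx : x ∈ S := hxs x List.mem_cons_self
    rw [pv_insertBy_congr b1 b2 x acc (fun y hy => hS x hx y (hacc y hy))]
    exact ih _ (fun z hz => hxs z (List.mem_cons_of_mem _ hz))
      (fun z hz => (PySem.List.mem_insertBy b2 x z acc).mp hz |>.elim
        (fun he => he ▸ hx) (fun hm => hacc z hm))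

theorem pv_sorted_rev_congr (xs : List Int) (k1 k2 : Int → Int)
    (h : ∀ x ∈ xs, k1 x = k2 x) :
    PySem.List.sorted xs k1 true = PySem.List.sorted xs k2 true := by
  rw [PySem.List.sorted_rev_eq_foldl_insertBy, PySem.List.sorted_rev_eq_foldl_insertBy]
  exact pv_foldl_insertBy_congr _ _ xs
    (fun x hx y hy => by rw [h x hx, h y hy]) xs [] (fun z hz => hz) (by simp)

-- dropping the unique pair with first component i from an fst-distinct pair list
theorem pv_erase_sum (i : Int) (w : String) :
    ∀ (l : List (Int × String)), l.Pairwise (fun p q => p.1 ≠ q.1) → (i, w) ∈ l →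
    (((l.filter (fun p => !(p.1 == i))).map (·.2)).map pvUtf8Len).sum
        = ((l.map (·.2)).map pvUtf8Len).sum - pvUtf8Len w
      ∧ ((l.filter (fun p => !(p.1 == i))).length : Int) = (l.length : Int) - 1 := by
  intro l hp hm
  induction l with
  | nil => simp at hm
  | cons p t ih =>
    rcases List.mem_cons.mp hm with he | hmt
    · subst he
      have hft : t.filter (fun p => !(p.1 == i)) = t := by
        apply List.filter_eq_self.mpr
        intro q hq
        simpa using fun h => ((List.pairwise_cons.mp hp).1 q hq) h.symm
      simp [hft]
    · have hne : p.1 ≠ i := by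
        intro h
        have := (List.pairwise_cons.mp hp).1 (i, w) hmt
        simp [h] at this
      have ⟨ih1, ih2⟩ := ih (List.pairwise_cons.mp hp).2 hmt
      simp only [List.filter_cons, List.map_cons, List.sum_cons, List.length_cons]
      rw [if_pos (by simp [hne])]
      simp only [List.map_cons, List.sum_cons, List.length_cons]
      constructor
      · rw [ih1]; ring
      · push_cast; omega

-- (j, working[j]) survives the acc filter when j is valid and unremoved
theorem pv_pair_mem (working : List String) (acc : List Int) (j : Int)
    (h0 : 0 ≤ j) (h1 : j < (working.length : Int)) (hj : acc.contains j = false) :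
    (j, PySem.List.pyGetD working j "") ∈
      (PySem.List.enumerate working 0).filter (fun p => !(acc.contains p.1)) := by
  rw [List.mem_filter]
  constructor
  · rw [PySem.List.mem_enumerate_iff]
    refine ⟨j.toNat, by omega, ?_⟩
    rw [PySem.List.pyGetD_eq_getElem working "" h0 h1]
    simp; omega
  · simpa using hj

-- removing one more index shortens the joined topic by exactly len + 3
theorem pv_fit_step (working : List String) (acc : List Int) (i r : Int)
    (hi0 : 0 ≤ i) (hin : i < (working.length : Int)) (hiacc : acc.contains i = false)
    (hr0 : 0 ≤ r) (hrn : r < (working.length : Int)) (hir : i ≠ r)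
    (hracc : acc.contains r = false) :
    pvUtf8Len (PySem.Str.join " | " (pvRem working (acc ++ [i])))
      = pvUtf8Len (PySem.Str.join " | " (pvRem working acc))
        - (pvUtf8Len (PySem.List.pyGetD working i "") + 3) := by
  set l := (PySem.List.enumerate working 0).filter (fun p => !(acc.contains p.1)) with hl
  have hpw : l.Pairwise (fun p q : Int × String => p.1 ≠ q.1) :=
    ((PySem.List.pairwise_lt_enumerate working 0).filter _).imp (fun h => by omega)
  have hmi : (i, PySem.List.pyGetD working i "") ∈ l := pv_pair_mem working acc i hi0 hin hiacc
  have hmr : (r, PySem.List.pyGetD working r "") ∈ l := pv_pair_mem working acc r hr0 hrn hracc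
  have hsplit : pvRem working (acc ++ [i]) = (l.filter (fun p => !(p.1 == i))).map (·.2) := by
    unfold pvRem
    rw [hl, List.filter_filter]
    congr 1
    apply List.filter_congr
    intro p _
    simp [Bool.and_comm, beq_eq_decide]
  have ⟨hsum, hlen⟩ := pv_erase_sum i (PySem.List.pyGetD working i "") l hpw hmi
  have hne1 : pvRem working acc ≠ [] := by
    unfold pvRem; rw [← hl]
    intro h
    rw [List.map_eq_nil_iff] at h
    rw [h] at hmr; simp at hmr
  have hne2 : pvRem working (acc ++ [i]) ≠ [] := by
    rw [hsplit]
    intro h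
    rw [List.map_eq_nil_iff] at h
    have : (r, PySem.List.pyGetD working r "") ∈ l.filter (fun p => !(p.1 == i)) := by
      rw [List.mem_filter]
      exact ⟨hmr, by simp; omega⟩
    rw [h] at this; simp at this
  rw [pv_join_len _ hne1, pv_join_len _ hne2, hsplit]
  unfold pvRem; rw [← hl]
  simp only [List.length_map]
  rw [hlen, hsum]
  ring

-- the greedy loop and its arithmetic mirror agree step for step
theorem pv_greedy (topiclen r : Int) (working : List String) (lens : List Int)
    (hkey : ∀ i : Int, 0 ≤ i → i < (working.length : Int) → i ≠ r →
      PySem.List.pyGetD lens i 0 = pvUtf8Len (PySem.List.pyGetD working i ""))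
    (hr0 : 0 ≤ r) (hrn : r < (working.length : Int)) :
    ∀ (os acc : List Int) (total : Int),
      (∀ j ∈ os, 0 ≤ j ∧ j < (working.length : Int) ∧ j ≠ r) →
      os.Nodup → (∀ j ∈ os, acc.contains j = false) → acc.contains r = false →
      total = pvUtf8Len (PySem.Str.join " | " (pvRem working acc)) →
      pvGreedyA topiclen working os acc = pvGreedyArith topiclen lens os total acc := by
  intro os
  induction os with
  | nil => intro acc total _ _ _ _ _; rfl
  | cons i rest ih =>
    intro acc total hval hnd hni hnr htot
    obtain ⟨hi0, hin, hir⟩ := hval i List.mem_cons_self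
    have hiacc : acc.contains i = false := hni i List.mem_cons_self
    have hstep := pv_fit_step working acc i r hi0 hin hiacc hr0 hrn hir hnr
    have htot' : total - (PySem.List.pyGetD lens i 0 + 3)
        = pvUtf8Len (PySem.Str.join " | " (pvRem working (acc ++ [i]))) := by
      rw [hstep, htot, hkey i hi0 hin hir]
    simp only [pvGreedyA, pvGreedyArith]
    rw [show (((PySem.List.enumerate working 0).filter
        (fun p => !((acc ++ [i]).contains p.1))).map (·.2)) = pvRem working (acc ++ [i]) from rfl]
    rw [← htot']
    by_cases hc : total - (PySem.List.pyGetD lens i 0 + 3) ≤ topiclen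
    · simp [hc]
    · simp only [hc, if_false]
      apply ih
      · exact fun j hj => hval j (List.mem_cons_of_mem _ hj)
      · exact hnd.of_cons
      · intro j hj
        have hji : j ≠ i := by
          intro h; subst h; exact (List.nodup_cons.mp hnd).1 hj
        have := hni j (List.mem_cons_of_mem _ hj)
        simp only [List.contains_append, this, Bool.false_or, List.contains_cons,
          List.contains_nil, Bool.or_false]
        simpa using hji
      · simp only [List.contains_append, hnr, Bool.false_or, List.contains_cons,
          List.contains_nil, Bool.or_false]
        simpa using Ne.symm hir
      · exact htot'

theorem pv_lens_get (segments : List String) (i : Int)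
    (h0 : 0 ≤ i) (h1 : i < (segments.length : Int)) :
    PySem.List.pyGetD (segments.map pvUtf8Len) i 0 = pvUtf8Len (PySem.List.pyGetD segments i "") := by
  rw [PySem.List.pyGetD_eq_getElem _ _ h0 (by simpa using h1),
      PySem.List.pyGetD_eq_getElem _ _ h0 h1, List.getElem_map]

theorem pv_working_get (segments : List String) (nq : String) (r i : Int)
    (h0 : 0 ≤ i) (h1 : i < (segments.length : Int)) :
    PySem.List.pyGetD ((PySem.List.enumerate segments 0).map
        (fun p => if p.1 == r then nq else p.2)) i ""
      = if i = r then nq else PySem.List.pyGetD segments i "" := by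
  rw [PySem.List.pyGetD_eq_getElem _ _ h0
      (by simp [PySem.List.length_enumerate]; omega), List.getElem_map,
      PySem.List.getElem_enumerate]
  by_cases hir : i = r
  · simp [hir]
    omega
  · rw [if_neg (by simp; omega), if_neg hir,
      PySem.List.pyGetD_eq_getElem _ _ h0 h1]

-- ===== new lemmas for B =====

theorem pvUtf8Len_nonneg (s : String) : 0 ≤ pvUtf8Len s := by
  apply List.sum_nonneg
  intro x hx
  obtain ⟨c, _, rfl⟩ := List.mem_map.mp hx
  unfold pvCharBytes
  split_ifs <;> omega

theorem pv_filter_len (r : Int) : ∀ (l : List Int), l.Nodup → r ∈ l →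
    (l.filter (fun i => !(i == r))).length = l.length - 1 := by
  intro l
  induction l with
  | nil => intro _ hm; simp at hm
  | cons a t ih =>
    intro h hm
    rcases List.mem_cons.mp hm with he | hmt
    · have hft : t.filter (fun i => !(i == r)) = t :=
        List.filter_eq_self.mpr (fun x hx => by
          simp only [Bool.not_eq_eq_eq_not, Bool.not_true, beq_eq_false_iff_ne]
          intro hh; rw [hh, he] at hx; exact (List.nodup_cons.mp h).1 hx)
      simp [← he, hft]
    · have hna : (a == r) = false := by
        simp only [beq_eq_false_iff_ne]
        intro hh; exact (List.nodup_cons.mp h).1 (hh ▸ hmt)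
      have hlen : 1 ≤ t.length := List.length_pos_of_mem hmt
      simp [hna, ih (List.nodup_cons.mp h).2 hmt]
      omega

theorem pv_scan_length (cs : List Int) : ∀ t, (pvScan t cs).length = cs.length := by
  induction cs with
  | nil => intro t; rfl
  | cons c cs ih => intro t; simp [pvScan, ih]

theorem pv_scan_get (cs : List Int) : ∀ (t : Int) (k : Nat), k < cs.length →
    (pvScan t cs)[k]? = some (t + (cs.take (k+1)).sum) := by
  induction cs with
  | nil => intro t k hk; simp at hk
  | cons c cs ih =>
    intro t k hk
    cases k with
    | zero => simp [pvScan]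
    | succ k' =>
      simp only [pvScan, List.getElem?_cons_succ]
      rw [ih (t + c) k' (by simpa using hk)]
      simp [List.take_succ_cons]
      ring

theorem pv_pfx_get (cs : List Int) (k : Nat) (hk : k ≤ cs.length) :
    PySem.List.pyGetD (0 :: pvScan 0 cs) (k : Int) 0 = (cs.take k).sum := by
  rw [PySem.List.pyGetD_eq_getElem _ _ (by omega)
      (by simp [pv_scan_length]; omega)]
  cases k with
  | zero => simp
  | succ k' =>
    simp only [Int.toNat_natCast]
    have hk' : k' < cs.length := by omega
    simp only [List.getElem_cons_succ]
    rw [← Option.some_inj, ← List.getElem?_eq_getElem, pv_scan_get cs 0 k' hk']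
    simp

theorem pv_scan_foldl : ∀ (cs acc : List Int) (t : Int), acc ≠ [] →
    PySem.List.pyGetD acc (-1) 0 = t →
    cs.foldl (fun p c => p ++ [PySem.List.pyGetD p (-1) 0 + c]) acc = acc ++ pvScan t cs := by
  intro cs
  induction cs with
  | nil => intro acc t _ _; simp [pvScan]
  | cons c cs ih =>
    intro acc t hne hlast
    simp only [List.foldl_cons, hlast, pvScan]
    rw [ih (acc ++ [t + c]) (t + c) (by simp)
        (PySem.List.pyGetD_neg_one_append_singleton ..)]
    simp

theorem pv_take_sum_mono (cs : List Int) (h : ∀ x ∈ cs, 0 ≤ x) (j k : Nat) (hjk : j ≤ k) :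
    (cs.take j).sum ≤ (cs.take k).sum := by
  have : cs.take k = cs.take j ++ ((cs.drop j).take (k - j)) := by
    rw [← List.take_add]
    congr 1
    omega
  rw [this, List.sum_append]
  have : 0 ≤ ((cs.drop j).take (k - j)).sum := by
    apply List.sum_nonneg
    intro x hx
    exact h x (List.mem_of_mem_drop (List.mem_of_mem_take hx))
  omega

theorem pv_ff_pos (L : Int) : ∀ (cs : List Int) (total k : Int),
    pvFirstFit L cs total = some k → 1 ≤ k := by
  intro cs
  induction cs with
  | nil => intro total k h; simp [pvFirstFit] at h
  | cons c cs ih =>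
    intro total k h
    simp only [pvFirstFit] at h
    split_ifs at h with hc
    · simp only [Option.some_inj] at h; omega
    · obtain ⟨k', hk', rfl⟩ := Option.map_eq_some_iff.mp h
      have := ih _ _ hk'
      omega

theorem pv_ff_some (L : Int) : ∀ (cs : List Int) (total k : Int), L < total →
    pvFirstFit L cs total = some k →
    1 ≤ k ∧ k.toNat ≤ cs.length ∧ total - (cs.take k.toNat).sum ≤ L
      ∧ L < total - (cs.take (k.toNat - 1)).sum := by
  intro cs
  induction cs with
  | nil => intro total k _ h; simp [pvFirstFit] at h
  | cons c cs ih =>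
    intro total k hL h
    simp only [pvFirstFit] at h
    split_ifs at h with hc
    · have hk1 : k = 1 := by simpa using h.symm
      subst hk1
      refine ⟨le_refl _, by simp, by simpa using hc, by simpa using hL⟩
    · obtain ⟨k', hk', rfl⟩ := Option.map_eq_some_iff.mp h
      obtain ⟨h1, h2, h3, h4⟩ := ih (total - c) k' (by omega) hk'
      have hkt : (k' + 1).toNat = k'.toNat + 1 := by omega
      refine ⟨by omega, by rw [hkt]; simp only [List.length_cons]; omega, ?_, ?_⟩
      · rw [hkt, List.take_succ_cons, List.sum_cons]; omega
      · rw [hkt]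
        have : k'.toNat + 1 - 1 = (k'.toNat - 1) + 1 := by omega
        rw [this, List.take_succ_cons, List.sum_cons]
        omega

theorem pv_ff_none (L : Int) : ∀ (cs : List Int) (total : Int),
    pvFirstFit L cs total = none → L < total → L < total - cs.sum := by
  intro cs
  induction cs with
  | nil => intro total _ hL; simpa using hL
  | cons c cs ih =>
    intro total h hL
    by_cases hc : total - c ≤ L
    · simp [pvFirstFit, hc] at h
    · simp only [pvFirstFit, if_neg hc, Option.map_eq_none_iff] at h
      have := ih (total - c) h (by omega)
      simp only [List.sum_cons]
      omega

-- A's arithmetic greedy loop computes the first fitting prefix of the cost list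
theorem pv_arith_eq_ff (L : Int) (lens : List Int) : ∀ (os : List Int) (total : Int) (acc : List Int),
    pvGreedyArith L lens os total acc
      = (pvFirstFit L (pvCosts lens os) total).map
          (fun k => PySem.List.sorted (acc ++ os.take k.toNat) (fun x => x) false) := by
  intro os
  induction os with
  | nil => intro total acc; rfl
  | cons i rest ih =>
    intro total acc
    simp only [pvGreedyArith, pvCosts, List.map_cons, pvFirstFit]
    by_cases hc : total - (PySem.List.pyGetD lens i 0 + 3) ≤ L
    · simp [hc]
    · simp only [hc, if_false]
      rw [ih]
      cases hff : pvFirstFit L (pvCosts lens rest) (total - (PySem.List.pyGetD lens i 0 + 3)) with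
      | none =>
        simp only [pvCosts] at hff
        rw [hff]
        rfl
      | some k =>
        have hk1 := pv_ff_pos L _ _ _ hff
        simp only [pvCosts] at hff
        rw [hff]
        simp only [Option.map_some]
        congr 1
        have hkt : (k + 1).toNat = k.toNat + 1 := by omega
        rw [hkt, List.take_succ_cons, ← List.append_cons]

-- ===== the per-replace-index branch bodies agree =====

theorem pv_bsearch_rec (L total : Int) (pfx : List Int) :
    ∀ (N : Nat) (lo hi : Int), (hi - lo).toNat ≤ N → lo ≤ hi →
    total - PySem.List.pyGetD pfx hi 0 ≤ L →
    L < total - PySem.List.pyGetD pfx (lo - 1) 0 →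
    lo ≤ pvBSearch L total pfx lo hi ∧ pvBSearch L total pfx lo hi ≤ hi ∧
    total - PySem.List.pyGetD pfx (pvBSearch L total pfx lo hi) 0 ≤ L ∧
    L < total - PySem.List.pyGetD pfx (pvBSearch L total pfx lo hi - 1) 0 := by
  intro N
  induction N with
  | zero =>
    intro lo hi hN hle hhi hlo
    have heq : lo = hi := by omega
    subst heq
    rw [pvBSearch, dif_neg (by omega)]
    exact ⟨le_refl _, le_refl _, hhi, hlo⟩
  | succ N ih =>
    intro lo hi hN hle hhi hlo
    by_cases hlt : lo < hi
    · rw [pvBSearch, dif_pos hlt]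
      have hb1 : lo ≤ PySem.Int.floordiv (lo + hi) 2 := by
        rw [PySem.Int.floordiv_eq_ediv_of_pos (by omega)]; omega
      have hb2 : PySem.Int.floordiv (lo + hi) 2 < hi := by
        rw [PySem.Int.floordiv_eq_ediv_of_pos (by omega)]; omega
      by_cases hm : total - PySem.List.pyGetD pfx (PySem.Int.floordiv (lo + hi) 2) 0 ≤ L
      · rw [if_pos hm]
        have := ih lo (PySem.Int.floordiv (lo + hi) 2) (by omega) (by omega) hm hlo
        exact ⟨this.1, by omega, this.2.2.1, this.2.2.2⟩
      · rw [if_neg hm]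
        have hlo' : L < total
            - PySem.List.pyGetD pfx ((PySem.Int.floordiv (lo + hi) 2 + 1) - 1) 0 := by
          rw [show PySem.Int.floordiv (lo + hi) 2 + 1 - 1
              = PySem.Int.floordiv (lo + hi) 2 by omega]
          omega
        have := ih (PySem.Int.floordiv (lo + hi) 2 + 1) hi (by omega) (by omega) hhi hlo'
        exact ⟨by omega, this.2.1, this.2.2.1, this.2.2.2⟩
    · rw [pvBSearch, dif_neg hlt]
      have heq : lo = hi := by omega
      exact ⟨le_refl _, hle, by rw [heq]; exact hhi, hlo⟩

theorem pv_bsearch_spec (L total : Int) (pfx : List Int) (lo hi : Int) (hle : lo ≤ hi)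
    (hhi : total - PySem.List.pyGetD pfx hi 0 ≤ L)
    (hlo : L < total - PySem.List.pyGetD pfx (lo - 1) 0) :
    lo ≤ pvBSearch L total pfx lo hi ∧ pvBSearch L total pfx lo hi ≤ hi ∧
    total - PySem.List.pyGetD pfx (pvBSearch L total pfx lo hi) 0 ≤ L ∧
    L < total - PySem.List.pyGetD pfx (pvBSearch L total pfx lo hi - 1) 0 :=
  pv_bsearch_rec L total pfx (hi - lo).toNat lo hi le_rfl hle hhi hlo


-- ===== the per-replace-index branch bodies agree =====

theorem pv_body_eq (segments : List String) (nq : String) (topiclen : Int)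
    (res : List (Int × List Int)) (r : Int)
    (hr0 : 0 ≤ r) (hrn : r < (segments.length : Int)) :
    (if pvUtf8Len (PySem.Str.join " | " ((PySem.List.enumerate segments 0).map
          (fun p => if p.1 == r then nq else p.2))) ≤ topiclen then res ++ [(r, ([] : List Int))]
     else
       match pvGreedyA topiclen
           ((PySem.List.enumerate segments 0).map (fun p => if p.1 == r then nq else p.2))
           (PySem.List.sorted ((PySem.List.pyRange 0 (PySem.List.len segments) 1).filter
               (fun i => !(i == r)))
             (fun i => pvUtf8Len (PySem.List.pyGetD segments i "")) true) [] with
       | some rs => res ++ [(r, rs)]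
       | none => res)
    = (if (segments.map pvUtf8Len).sum + 3 * (PySem.List.len segments - 1) + pvUtf8Len nq
            - PySem.List.pyGetD (segments.map pvUtf8Len) r 0 ≤ topiclen then
        res ++ [(r, ([] : List Int))]
       else
         if topiclen < (segments.map pvUtf8Len).sum + 3 * (PySem.List.len segments - 1)
             + pvUtf8Len nq - PySem.List.pyGetD (segments.map pvUtf8Len) r 0
             - PySem.List.pyGetD
                 ((PySem.List.sorted ((PySem.List.pyRange 0 (PySem.List.len segments) 1).filter
                     (fun i => !(i == r)))
                   (fun i => PySem.List.pyGetD (segments.map pvUtf8Len) i 0) true).foldl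
                   (fun p i => p ++ [PySem.List.pyGetD p (-1) 0
                     + (PySem.List.pyGetD (segments.map pvUtf8Len) i 0 + 3)]) [(0 : Int)])
                 (PySem.List.len segments - 1) 0 then res
         else
           res ++ [(r, PySem.List.sorted
             (PySem.List.slice
               (PySem.List.sorted ((PySem.List.pyRange 0 (PySem.List.len segments) 1).filter
                   (fun i => !(i == r)))
                 (fun i => PySem.List.pyGetD (segments.map pvUtf8Len) i 0) true)
               none
               (some (pvBSearch topiclen
                 ((segments.map pvUtf8Len).sum + 3 * (PySem.List.len segments - 1)
                   + pvUtf8Len nq - PySem.List.pyGetD (segments.map pvUtf8Len) r 0)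
                 ((PySem.List.sorted ((PySem.List.pyRange 0 (PySem.List.len segments) 1).filter
                     (fun i => !(i == r)))
                   (fun i => PySem.List.pyGetD (segments.map pvUtf8Len) i 0) true).foldl
                   (fun p i => p ++ [PySem.List.pyGetD p (-1) 0
                     + (PySem.List.pyGetD (segments.map pvUtf8Len) i 0 + 3)]) [(0 : Int)])
                 1 (PySem.List.len segments - 1))))
             (fun x => x) false)]) := by
  have hWlen : (((PySem.List.enumerate segments 0).map
      (fun p => if p.1 == r then nq else p.2)).length : Int) = (segments.length : Int) := by
    simp [PySem.List.length_enumerate]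
  have hfit0 : pvUtf8Len (PySem.Str.join " | " ((PySem.List.enumerate segments 0).map
        (fun p => if p.1 == r then nq else p.2)))
      = (segments.map pvUtf8Len).sum + 3 * (PySem.List.len segments - 1) + pvUtf8Len nq
          - PySem.List.pyGetD (segments.map pvUtf8Len) r 0 := by
    have hne : ((PySem.List.enumerate segments 0).map
        (fun p => if p.1 == r then nq else p.2)) ≠ [] := by
      intro h
      rw [h] at hWlen
      simp at hWlen
      omega
    rw [pv_join_len _ hne]
    have hsw := pv_sum_working nq segments 0 r hr0 (by omega)
    rw [sub_zero] at hsw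
    rw [hsw, hWlen, pv_lens_get segments r hr0 hrn, PySem.List.len_eq]
    ring
  rw [hfit0]
  by_cases hc : (segments.map pvUtf8Len).sum + 3 * (PySem.List.len segments - 1) + pvUtf8Len nq
      - PySem.List.pyGetD (segments.map pvUtf8Len) r 0 ≤ topiclen
  · rw [if_pos hc, if_pos hc]
  · rw [if_neg hc, if_neg hc]
    have hos : PySem.List.sorted ((PySem.List.pyRange 0 (PySem.List.len segments) 1).filter
            (fun i => !(i == r)))
          (fun i => pvUtf8Len (PySem.List.pyGetD segments i "")) true
        = PySem.List.sorted ((PySem.List.pyRange 0 (PySem.List.len segments) 1).filter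
            (fun i => !(i == r)))
          (fun i => PySem.List.pyGetD (segments.map pvUtf8Len) i 0) true := by
      apply pv_sorted_rev_congr
      intro x hx
      have hx' := PySem.List.mem_pyRange_one.mp (List.mem_of_mem_filter hx)
      rw [PySem.List.len_eq] at hx'
      exact (pv_lens_get segments x hx'.1 hx'.2).symm
    rw [hos]
    set lens := segments.map pvUtf8Len with hlens
    set T := lens.sum + 3 * (PySem.List.len segments - 1) + pvUtf8Len nq
      - PySem.List.pyGetD lens r 0 with hT
    set os := PySem.List.sorted ((PySem.List.pyRange 0 (PySem.List.len segments) 1).filter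
        (fun i => !(i == r)))
      (fun i => PySem.List.pyGetD lens i 0) true with hosdef
    set cs := pvCosts lens os with hcs
    -- A's greedy loop equals its arithmetic mirror, then the first-fit computation
    have hg : pvGreedyA topiclen
        ((PySem.List.enumerate segments 0).map (fun p => if p.1 == r then nq else p.2)) os []
        = pvGreedyArith topiclen lens os T [] := by
      apply pv_greedy topiclen r _ _ _ hr0 (by rw [hWlen]; exact hrn)
      · intro j hj
        have hj1 := List.mem_of_mem_filter ((PySem.List.mem_sorted _ _ _ _).mp hj)
        have hj2 := (PySem.List.mem_sorted _ _ _ _).mp hj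
        rw [List.mem_filter] at hj2
        have hjr : j ≠ r := by simpa using hj2.2
        have := PySem.List.mem_pyRange_one.mp hj1
        rw [PySem.List.len_eq] at this
        exact ⟨this.1, by rw [hWlen]; exact this.2, hjr⟩
      · rw [List.Perm.nodup_iff (PySem.List.sorted_perm _ _ _)]
        exact (PySem.List.nodup_pyRange_one 0 (PySem.List.len segments)).filter _
      · intro j _; rfl
      · rfl
      · have hremW : pvRem ((PySem.List.enumerate segments 0).map
            (fun p => if p.1 == r then nq else p.2)) []
            = (PySem.List.enumerate segments 0).map (fun p => if p.1 == r then nq else p.2) := by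
          simp [pvRem, PySem.List.map_snd_enumerate]
        rw [hremW, hfit0]
      · intro i hi0 hin hir
        rw [pv_working_get segments nq r i hi0 (by rw [← hWlen]; exact hin), if_neg hir,
          pv_lens_get segments i hi0 (by rw [← hWlen]; exact hin)]
    rw [hg, pv_arith_eq_ff]
    -- facts about os, cs and the prefix array
    have hosl : (os.length : Int) = PySem.List.len segments - 1 := by
      have h1 : os.length = ((PySem.List.pyRange 0 (PySem.List.len segments) 1).filter
          (fun i => !(i == r))).length := by
        rw [hosdef]; exact PySem.List.length_sorted _ _ _
      have hmem : r ∈ PySem.List.pyRange 0 (PySem.List.len segments) 1 := by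
        apply PySem.List.mem_pyRange_one.mpr
        rw [PySem.List.len_eq]
        exact ⟨hr0, hrn⟩
      have h2 := pv_filter_len r (PySem.List.pyRange 0 (PySem.List.len segments) 1)
        (PySem.List.nodup_pyRange_one 0 _) hmem
      have h3 : (PySem.List.pyRange 0 (PySem.List.len segments) 1).length
          = (PySem.List.len segments).toNat := by
        rw [PySem.List.length_pyRange_one]
        omega
      have h4 : 1 ≤ (PySem.List.pyRange 0 (PySem.List.len segments) 1).length :=
        List.length_pos_of_mem hmem
      rw [h1, h2, h3]
      rw [h3] at h4
      simp only [PySem.List.len_eq] at h4 ⊢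
      omega
    have hcl : cs.length = os.length := by rw [hcs, pvCosts]; simp
    have hpfx : os.foldl (fun p i => p ++ [PySem.List.pyGetD p (-1) 0
          + (PySem.List.pyGetD lens i 0 + 3)]) [(0 : Int)] = 0 :: pvScan 0 cs := by
      have h1 : os.foldl (fun p i => p ++ [PySem.List.pyGetD p (-1) 0
            + (PySem.List.pyGetD lens i 0 + 3)]) [(0 : Int)]
          = cs.foldl (fun p c => p ++ [PySem.List.pyGetD p (-1) 0 + c]) [(0 : Int)] := by
        rw [hcs, pvCosts, List.foldl_map]
      rw [h1, pv_scan_foldl cs [(0 : Int)] 0 (by simp) (by decide)]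
      rfl
    have hPk : ∀ j : Int, 0 ≤ j → j ≤ (cs.length : Int) →
        PySem.List.pyGetD (0 :: pvScan 0 cs) j 0 = (cs.take j.toNat).sum := by
      intro j h0 h1
      have hj : j = ((j.toNat : Nat) : Int) := by omega
      rw [hj]
      exact pv_pfx_get cs j.toNat (by omega)
    have hnn : ∀ x ∈ cs, 0 ≤ x := by
      intro x hx
      rw [hcs, pvCosts] at hx
      obtain ⟨i, hi, rfl⟩ := List.mem_map.mp hx
      have hi2 := (PySem.List.mem_sorted _ _ _ _).mp hi
      have hi3 := PySem.List.mem_pyRange_one.mp (List.mem_of_mem_filter hi2)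
      rw [PySem.List.len_eq] at hi3
      have : 0 ≤ PySem.List.pyGetD lens i 0 := by
        rw [hlens, pv_lens_get segments i hi3.1 hi3.2]
        exact pvUtf8Len_nonneg _
      omega
    have hlen1 : PySem.List.len segments - 1 = (cs.length : Int) := by
      rw [hcl, hosl]
    have hguard : PySem.List.pyGetD (0 :: pvScan 0 cs) (PySem.List.len segments - 1) 0
        = cs.sum := by
      rw [hlen1, hPk _ (by omega) (by omega)]
      simp
    rw [hpfx]
    by_cases hB : topiclen < T - cs.sum
    · rw [hguard, if_pos hB]
      cases hff : pvFirstFit topiclen cs T with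
      | none => rfl
      | some k =>
        exfalso
        obtain ⟨hk1, hk2, hk3, hk4⟩ := pv_ff_some topiclen cs T k (by omega) hff
        have hmono := pv_take_sum_mono cs hnn k.toNat cs.length hk2
        rw [List.take_length] at hmono
        omega
    · have hB' : T - cs.sum ≤ topiclen := by omega
      rw [hguard, if_neg (by omega)]
      cases hff : pvFirstFit topiclen cs T with
      | none =>
        exfalso
        have := pv_ff_none topiclen cs T hff (by omega)
        omega
      | some k =>
        obtain ⟨hk1, hk2, hk3, hk4⟩ := pv_ff_some topiclen cs T k (by omega) hff
        simp only [Option.map_some]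
        have hm1 : 1 ≤ (cs.length : Int) := by omega
        have h00 : PySem.List.pyGetD (0 :: pvScan 0 cs) ((1 : Int) - 1) 0 = 0 := by
          rw [show (1 : Int) - 1 = ((0 : Nat) : Int) by omega]
          simpa using pv_pfx_get cs 0 (Nat.zero_le _)
        obtain ⟨hb1, hb2, hb3, hb4⟩ := pv_bsearch_spec topiclen T (0 :: pvScan 0 cs)
          1 (PySem.List.len segments - 1) (by omega)
          (by rw [hguard]; exact hB') (by rw [h00]; omega)
        set bs := pvBSearch topiclen T (0 :: pvScan 0 cs) 1 (PySem.List.len segments - 1)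
          with hbs
        have hb3' : T - (cs.take bs.toNat).sum ≤ topiclen := by
          rw [hPk bs (by omega) (by omega)] at hb3
          exact hb3
        have hb4' : topiclen < T - (cs.take (bs.toNat - 1)).sum := by
          rw [hPk (bs - 1) (by omega) (by omega)] at hb4
          have : (bs - 1).toNat = bs.toNat - 1 := by omega
          rw [this] at hb4
          exact hb4
        have hkbs : bs = k := by
          by_contra hne
          rcases lt_or_gt_of_ne hne with hlt | hgt
          · have h1 : bs.toNat ≤ k.toNat - 1 := by omega
            have := pv_take_sum_mono cs hnn bs.toNat (k.toNat - 1) h1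
            omega
          · have h1 : k.toNat ≤ bs.toNat - 1 := by omega
            have := pv_take_sum_mono cs hnn k.toNat (bs.toNat - 1) h1
            omega
        rw [PySem.List.slice_to _ (by omega : (0 : Int) ≤ bs), hkbs]
        simp

-- ===== VERDICT (by name: the statement is the Claim_ definition above) =====
theorem find_fit_combos_spec : Claim_equal_find_fit_combos := by
  intro segments nq topiclen max_combos _
  unfold Spec_find_fit_combos find_fit_combos find_fit_combos_alt
  dsimp only
  have hres :
      (PySem.List.pyRange 0 (PySem.List.len segments) 1).foldl
        (fun res r =>
          if pvUtf8Len (PySem.Str.join " | " ((PySem.List.enumerate segments 0).map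
                (fun p => if p.1 == r then nq else p.2))) ≤ topiclen then res ++ [(r, ([] : List Int))]
          else
            match pvGreedyA topiclen
                ((PySem.List.enumerate segments 0).map (fun p => if p.1 == r then nq else p.2))
                (PySem.List.sorted ((PySem.List.pyRange 0 (PySem.List.len segments) 1).filter
                    (fun i => !(i == r)))
                  (fun i => pvUtf8Len (PySem.List.pyGetD segments i "")) true) [] with
            | some rs => res ++ [(r, rs)]
            | none => res) ([] : List (Int × List Int))
      = (PySem.List.pyRange 0 (PySem.List.len segments) 1).foldl
        (fun res r =>
          if (segments.map pvUtf8Len).sum + 3 * (PySem.List.len segments - 1) + pvUtf8Len nq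
              - PySem.List.pyGetD (segments.map pvUtf8Len) r 0 ≤ topiclen then
            res ++ [(r, ([] : List Int))]
          else
            if topiclen < (segments.map pvUtf8Len).sum + 3 * (PySem.List.len segments - 1)
                + pvUtf8Len nq - PySem.List.pyGetD (segments.map pvUtf8Len) r 0
                - PySem.List.pyGetD
                    ((PySem.List.sorted ((PySem.List.pyRange 0 (PySem.List.len segments) 1).filter
                        (fun i => !(i == r)))
                      (fun i => PySem.List.pyGetD (segments.map pvUtf8Len) i 0) true).foldl
                      (fun p i => p ++ [PySem.List.pyGetD p (-1) 0
                        + (PySem.List.pyGetD (segments.map pvUtf8Len) i 0 + 3)]) [(0 : Int)])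
                    (PySem.List.len segments - 1) 0 then res
            else
              res ++ [(r, PySem.List.sorted
                (PySem.List.slice
                  (PySem.List.sorted ((PySem.List.pyRange 0 (PySem.List.len segments) 1).filter
                      (fun i => !(i == r)))
                    (fun i => PySem.List.pyGetD (segments.map pvUtf8Len) i 0) true)
                  none
                  (some (pvBSearch topiclen
                    ((segments.map pvUtf8Len).sum + 3 * (PySem.List.len segments - 1)
                      + pvUtf8Len nq - PySem.List.pyGetD (segments.map pvUtf8Len) r 0)
                    ((PySem.List.sorted ((PySem.List.pyRange 0 (PySem.List.len segments) 1).filter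
                        (fun i => !(i == r)))
                      (fun i => PySem.List.pyGetD (segments.map pvUtf8Len) i 0) true).foldl
                      (fun p i => p ++ [PySem.List.pyGetD p (-1) 0
                        + (PySem.List.pyGetD (segments.map pvUtf8Len) i 0 + 3)]) [(0 : Int)])
                    1 (PySem.List.len segments - 1))))
                (fun x => x) false)]) ([] : List (Int × List Int)) := by
    apply PySem.List.foldl_congr_mem
    intro res r hr
    have hmr := PySem.List.mem_pyRange_one.mp hr
    have hrn : r < (segments.length : Int) := by
      have := hmr.2; rwa [PySem.List.len_eq] at this
    exact pv_body_eq segments nq topiclen res r hmr.1 hrn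
  rw [hres]
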